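-- pv_equiv track=rewrite | github.com/DorianPRJ7/IA-ChessQuito | ChessQuitto/Tests_IA_vs_IA/utilitaires.py | calcul_score_plateau
-- ===== SOURCE A (Python) =====
-- def cout_piece(val_piece):
--     if val_piece=='R' or val_piece=='RR':
--         return 5
--     elif val_piece=='T' :
--         return 4
--     elif val_piece=='C':
--         return 3
--     elif val_piece=='F':
--         return 2
--     elif val_piece=='RP':
--         return 1
--     else :
--         return 0
--
-- def calcul_score_plateau(jeu):
--     score_blancs=0
--     score_noirs=0
--
--     for ligne in jeu:
--         for piece in ligne:
--             if piece != '.':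
--                 couleur = piece[0]
--                 valeur = piece[1:]
--                 if couleur == 'B':
--                     score_blancs += cout_piece(valeur)
--                 else:
--                     score_noirs += cout_piece(valeur)
--
--     return score_blancs, score_noirs
-- ===== SOURCE B (Python) =====
-- def calcul_score_plateau(jeu):
--     VALEURS = {'R': 5, 'RR': 5, 'T': 4, 'C': 3, 'F': 2, 'RP': 1}
--     # phase 1: tally every occupied cell by (colour, piece-kind) key
--     tally = {}
--     for ligne in jeu:
--         for piece in ligne:
--             if piece != '.':
--                 cle = (piece[0], piece[1:])
--                 tally[cle] = tally.get(cle, 0) + 1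
--     # phase 2: one pass over the (much smaller) tally table
--     score_blancs = 0
--     score_noirs = 0
--     for (couleur, valeur), n in tally.items():
--         pts = VALEURS.get(valeur, 0) * n
--         if couleur == 'B':
--             score_blancs += pts
--         else:
--             score_noirs += pts
--     return score_blancs, score_noirs
-- ===== Notes on version B (the rewrite author's own statement) =====
-- stated objective: alternative
-- what changed: Replaces the per-cell if/elif score accumulation by a two-phase tally: a dict counting (colour, kind) pairs built in one pass, then the two scores computed by a single pass over the tally using a value table with .get(...,0).
import Mathlib
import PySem

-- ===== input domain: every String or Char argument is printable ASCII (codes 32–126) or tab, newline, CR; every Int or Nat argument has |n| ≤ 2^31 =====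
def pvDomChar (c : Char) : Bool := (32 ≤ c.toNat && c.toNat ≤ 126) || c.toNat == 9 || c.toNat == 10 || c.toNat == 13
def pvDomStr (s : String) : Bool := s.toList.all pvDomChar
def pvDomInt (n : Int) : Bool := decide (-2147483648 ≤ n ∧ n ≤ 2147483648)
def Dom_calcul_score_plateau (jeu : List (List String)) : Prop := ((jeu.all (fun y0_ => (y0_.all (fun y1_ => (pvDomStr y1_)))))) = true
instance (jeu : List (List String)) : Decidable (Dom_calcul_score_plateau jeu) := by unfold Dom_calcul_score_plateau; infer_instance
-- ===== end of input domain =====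

-- B replaces the per-cell if/elif accumulation by a two-phase tally (dict of
-- (colour,kind) counts, then one pass over the tally with a value table); same cost.
-- ===== PORT A =====
def cout_piece (val_piece : String) : Int :=
  if val_piece = "R" ∨ val_piece = "RR" then 5
  else if val_piece = "T" then 4
  else if val_piece = "C" then 3
  else if val_piece = "F" then 2
  else if val_piece = "RP" then 1
  else 0

def calcul_score_plateau (jeu : List (List String)) : Int × Int :=
  jeu.foldl (fun s ligne =>
    ligne.foldl (fun (s : Int × Int) piece =>
      if piece ≠ "." then
        -- piece[0]: IndexError on "" is excluded by Pre_; the default is never read there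
        let couleur := (PySem.Str.pyGet? piece 0).getD ' '
        let valeur := PySem.Str.slice piece (some 1) none
        if couleur = 'B' then (s.1 + cout_piece valeur, s.2)
        else (s.1, s.2 + cout_piece valeur)
      else s) s) (0, 0)

-- ===== PORT B =====
def valeursB : PySem.Dict String Int :=
  PySem.Dict.ofList [("R", 5), ("RR", 5), ("T", 4), ("C", 3), ("F", 2), ("RP", 1)]

def calcul_score_plateau_alt (jeu : List (List String)) : Int × Int :=
  let tally : PySem.Dict (Char × String) Int :=
    jeu.foldl (fun d ligne =>
      ligne.foldl (fun (d : PySem.Dict (Char × String) Int) piece =>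
        if piece ≠ "." then
          let cle := ((PySem.Str.pyGet? piece 0).getD ' ', PySem.Str.slice piece (some 1) none)
          d.insert cle (d.getD cle 0 + 1)
        else d) d) PySem.Dict.empty
  tally.items.foldl (fun (s : Int × Int) it =>
    let pts := valeursB.getD it.1.2 0 * it.2
    if it.1.1 = 'B' then (s.1 + pts, s.2) else (s.1, s.2 + pts)) (0, 0)

-- ===== PRECONDITION & SPEC =====
-- Pre_ excludes boards containing an empty-string cell: Python A raises IndexError on piece[0] there.
def Pre_calcul_score_plateau (jeu : List (List String)) : Prop :=
  ∀ ligne ∈ jeu, ∀ p ∈ ligne, p ≠ ""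
instance (jeu : List (List String)) : Decidable (Pre_calcul_score_plateau jeu) := by
  unfold Pre_calcul_score_plateau; infer_instance
def pvWitness_calcul_score_plateau : List (List String) := [["BR", "."], ["NT", "BF"]]

def Spec_calcul_score_plateau (jeu : List (List String)) (out : Int × Int) : Prop := out = calcul_score_plateau_alt jeu
instance (jeu : List (List String)) (out : Int × Int) : Decidable (Spec_calcul_score_plateau jeu out) := by unfold Spec_calcul_score_plateau; infer_instance

-- ===== CLAIM (what is proved, stated in full; the proofs are below) =====
def Claim_equal_calcul_score_plateau : Prop := ∀ (jeu : List (List String)), Dom_calcul_score_plateau jeu → Pre_calcul_score_plateau jeu → Spec_calcul_score_plateau jeu (calcul_score_plateau jeu)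

-- ===== LEMMAS AND PROOFS =====

-- the (colour, kind) key of a cell, and the key list of all occupied cells
def keyOf (p : String) : Char × String :=
  ((PySem.Str.pyGet? p 0).getD ' ', PySem.Str.slice p (some 1) none)

def keysRow (ligne : List String) : List (Char × String) :=
  (ligne.filter (fun p => p ≠ ".")).map keyOf

def keysOf (jeu : List (List String)) : List (Char × String) :=
  (jeu.flatten.filter (fun p => p ≠ ".")).map keyOf

def gB (k : Char × String) : Int := if k.1 = 'B' then cout_piece k.2 else 0
def gN (k : Char × String) : Int := if k.1 = 'B' then 0 else cout_piece k.2

-- B's value table agrees with A's if/elif chain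
theorem valeursB_getD (s : String) : valeursB.getD s 0 = cout_piece s := by
  by_cases h1 : s = "R"; · subst h1; decide
  by_cases h2 : s = "RR"; · subst h2; decide
  by_cases h3 : s = "T"; · subst h3; decide
  by_cases h4 : s = "C"; · subst h4; decide
  by_cases h5 : s = "F"; · subst h5; decide
  by_cases h6 : s = "RP"; · subst h6; decide
  have h : valeursB = PySem.Dict.mk [("R", 5), ("RR", 5), ("T", 4), ("C", 3), ("F", 2), ("RP", 1)] := by
    decide
  rw [h]
  simp [PySem.Dict.getD_eq_get?_getD, cout_piece, beq_iff_eq, Ne.symm h1, Ne.symm h2,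
    Ne.symm h3, Ne.symm h4, Ne.symm h5, Ne.symm h6, h1, h2, h3, h4, h5, h6, PySem.Dict.get?]

-- a fold over the occupied cells of one row is a fold over its key list
theorem row_to_keys {σ : Type} (f : σ → (Char × String) → σ) (ligne : List String) (s : σ) :
    ligne.foldl (fun s p => if p ≠ "." then f s (keyOf p) else s) s
      = (keysRow ligne).foldl f s := by
  induction ligne generalizing s with
  | nil => rfl
  | cons p l ih =>
    simp only [List.foldl_cons]
    by_cases h : p = "."
    · rw [if_neg (by simp [h]), ih]; simp [keysRow, h]
    · rw [if_pos (by simp [h]), ih]; simp [keysRow, h]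

-- the nested cell loop of either port is a single fold over the key list
theorem nested_to_keys {σ : Type} (f : σ → (Char × String) → σ) (jeu : List (List String)) (s : σ) :
    jeu.foldl (fun s ligne => ligne.foldl (fun s p => if p ≠ "." then f s (keyOf p) else s) s) s
      = (keysOf jeu).foldl f s := by
  induction jeu generalizing s with
  | nil => rfl
  | cons ligne rest ih =>
    simp only [List.foldl_cons]
    rw [row_to_keys, ih]
    simp [keysOf, keysRow, List.filter_append, List.foldl_append]

-- an accumulating pair fold splits into the two filtered sums
theorem foldl_pair_split {β : Type} (M : List β) (pred : β → Prop) [DecidablePred pred]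
    (pay : β → Int) (b n : Int) :
    M.foldl (fun (s : Int × Int) it =>
        if pred it then (s.1 + pay it, s.2) else (s.1, s.2 + pay it)) (b, n)
      = (b + (M.map (fun it => if pred it then pay it else 0)).sum,
         n + (M.map (fun it => if pred it then 0 else pay it)).sum) := by
  induction M generalizing b n with
  | nil => simp
  | cons x M ih =>
    by_cases h : pred x <;> simp [h, ih] <;> ring

-- A computes the two sums over the key list
theorem A_eq (jeu : List (List String)) :
    calcul_score_plateau jeu = (((keysOf jeu).map gB).sum, ((keysOf jeu).map gN).sum) := by
  have h1 : calcul_score_plateau jeu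
      = (keysOf jeu).foldl (fun (s : Int × Int) k =>
          if k.1 = 'B' then (s.1 + cout_piece k.2, s.2) else (s.1, s.2 + cout_piece k.2)) (0, 0) :=
    nested_to_keys (fun (s : Int × Int) k =>
      if k.1 = 'B' then (s.1 + cout_piece k.2, s.2) else (s.1, s.2 + cout_piece k.2)) jeu (0, 0)
  rw [h1, foldl_pair_split (keysOf jeu) (fun k => k.1 = 'B') (fun k => cout_piece k.2) 0 0]
  simp only [zero_add]
  rfl

-- B's phase 1 builds Counter(keysOf jeu)
theorem tally_eq (jeu : List (List String)) :
    (jeu.foldl (fun d ligne =>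
      ligne.foldl (fun (d : PySem.Dict (Char × String) Int) piece =>
        if piece ≠ "." then
          let cle := ((PySem.Str.pyGet? piece 0).getD ' ', PySem.Str.slice piece (some 1) none)
          d.insert cle (d.getD cle 0 + 1)
        else d) d) PySem.Dict.empty)
      = PySem.Dict.counter (keysOf jeu) := by
  have h1 : (jeu.foldl (fun d ligne =>
      ligne.foldl (fun (d : PySem.Dict (Char × String) Int) piece =>
        if piece ≠ "." then
          let cle := ((PySem.Str.pyGet? piece 0).getD ' ', PySem.Str.slice piece (some 1) none)
          d.insert cle (d.getD cle 0 + 1)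
        else d) d) PySem.Dict.empty)
      = (keysOf jeu).foldl (fun d k => d.insert k (d.getD k 0 + 1)) PySem.Dict.empty :=
    nested_to_keys (fun (d : PySem.Dict (Char × String) Int) k => d.insert k (d.getD k 0 + 1))
      jeu PySem.Dict.empty
  rw [h1, PySem.Dict.foldl_insert_getD_add_one_eq_counter]

theorem sum_discard {α : Type} [BEq α] [LawfulBEq α] (s : List α) (hs : s.Nodup) (x : α) (h : α → Int) :
    ((PySem.Set.discard s x).map h).sum + (if x ∈ s then h x else 0) = (s.map h).sum := by
  by_cases hx : x ∈ s
  · have hperm : s.Perm (x :: s.erase x) := List.perm_cons_erase hx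
    have hsum : (s.map h).sum = ((x :: s.erase x).map h).sum := (hperm.map h).sum_eq
    have hd : PySem.Set.discard s x = s.erase x := by
      rw [hs.erase_eq_filter]
      simp [PySem.Set.discard, bne]
    rw [hsum, hd, if_pos hx]
    simp
    omega
  · have hd : PySem.Set.discard s x = s := by
      simp only [PySem.Set.discard]
      refine List.filter_eq_self.mpr (fun a ha => ?_)
      have : a ≠ x := fun e => hx (e ▸ ha)
      simp [this]
    simp [hx, hd]

-- summing g(k)·count(k) over the distinct keys is summing g over the whole list
theorem sum_count {α : Type} [BEq α] [LawfulBEq α] (L : List α) (g : α → Int) :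
    ((PySem.Set.ofList L).map (fun k => g k * L.count k)).sum = (L.map g).sum := by
  induction L with
  | nil => simp
  | cons x xs ih =>
    rw [PySem.Set.ofList_cons]
    have hcnt : ∀ k ∈ PySem.Set.discard (PySem.Set.ofList xs) x,
        (fun k => g k * ((x :: xs).count k : Int)) k = (fun k => g k * (xs.count k : Int)) k := by
      intro k hk
      have hne : k ≠ x := ((PySem.Set.mem_discard _ _ _).mp hk).2
      simp [List.count_cons]
      exact Or.inl (fun e => hne e.symm)
    rw [List.map_cons, List.map_congr_left hcnt, List.sum_cons]
    have hsd := sum_discard (PySem.Set.ofList xs) (PySem.Set.nodup_ofList xs) x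
      (fun k => g k * (xs.count k : Int))
    by_cases hx : x ∈ xs
    · have hx' : x ∈ PySem.Set.ofList xs := (PySem.Set.mem_ofList _ _).mpr hx
      rw [if_pos hx'] at hsd
      simp only [List.map_cons, List.sum_cons, ← ih, ← hsd, List.count_cons_self]
      push_cast
      ring
    · have hx' : x ∉ PySem.Set.ofList xs := fun hm => hx ((PySem.Set.mem_ofList _ _).mp hm)
      rw [if_neg hx'] at hsd
      have hc : xs.count x = 0 := List.count_eq_zero.mpr hx
      simp only [List.map_cons, List.sum_cons, ← ih, ← hsd, List.count_cons_self, hc]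
      push_cast
      ring

-- B's phase 2 over Counter(L) yields the two sums over L
theorem phase2 (L : List (Char × String)) :
    (PySem.Dict.counter L).items.foldl (fun (s : Int × Int) it =>
      let pts := valeursB.getD it.1.2 0 * it.2
      if it.1.1 = 'B' then (s.1 + pts, s.2) else (s.1, s.2 + pts)) (0, 0)
      = ((L.map gB).sum, (L.map gN).sum) := by
  have h1 : (PySem.Dict.counter L).items.foldl (fun (s : Int × Int) it =>
      let pts := valeursB.getD it.1.2 0 * it.2
      if it.1.1 = 'B' then (s.1 + pts, s.2) else (s.1, s.2 + pts)) (0, 0)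
      = (PySem.Set.ofList L).foldl (fun (s : Int × Int) k =>
          if k.1 = 'B' then (s.1 + valeursB.getD k.2 0 * (L.count k : Int), s.2)
          else (s.1, s.2 + valeursB.getD k.2 0 * (L.count k : Int))) (0, 0) := by
    rw [PySem.Dict.items_counter, List.foldl_map]
  have h2 := foldl_pair_split (PySem.Set.ofList L) (fun k => k.1 = 'B')
    (fun k => valeursB.getD k.2 0 * (L.count k : Int)) 0 0
  rw [h1, h2]
  have e1 : ∀ k ∈ PySem.Set.ofList L,
      (fun k => if k.1 = 'B' then valeursB.getD k.2 0 * (L.count k : Int) else 0) k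
        = (fun k => gB k * (L.count k : Int)) k := by
    intro k _
    by_cases h : k.1 = 'B' <;> simp [gB, h, valeursB_getD]
  have e2 : ∀ k ∈ PySem.Set.ofList L,
      (fun k => if k.1 = 'B' then 0 else valeursB.getD k.2 0 * (L.count k : Int)) k
        = (fun k => gN k * (L.count k : Int)) k := by
    intro k _
    by_cases h : k.1 = 'B' <;> simp [gN, h, valeursB_getD]
  rw [List.map_congr_left e1, List.map_congr_left e2, sum_count L gB, sum_count L gN]
  simp

-- ===== VERDICT (by name: the statement is the Claim_ definition above) =====
theorem calcul_score_plateau_spec : Claim_equal_calcul_score_plateau := by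
  intro jeu _ _
  unfold Spec_calcul_score_plateau calcul_score_plateau_alt
  rw [A_eq, tally_eq, phase2]
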